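-- pv_equiv track=rewrite | github.com/hschong/Algorithms-and-Data-Structures | getMaxPointsToTop.py | getMaxPointsToTop
-- ===== SOURCE A (Python) =====
-- def getMaxPointsToTop(pointList):
--     '''
--     각 계단에 쓰여있는 점수가 list로 주어질 때, 이 게임에서 얻을 수
--     있는 총 점수의 최댓값을 반환하는 함수를 작성하세요.
--
--     T(i) : i번째 계단을 마지막으로 밟는 총 점수의 최대 값
--     T(i) = max( T(i-2) + data(i), T(i-3) + data(i-1) + data(i) )
--     '''
--
--     stairs = len(pointList)
--     Table = [0 for i in range(stairs)]
--
--     if stairs == 0: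
--         return 0
--     elif stairs == 1:
--         return pointList[0]
--     elif stairs == 2:
--         return pointList[0] + pointList[1]
--     elif stairs == 3:
--         return max(pointList[0]+pointList[2], pointList[1] + pointList[2])
--
--     Table[0] = pointList[0]
--     Table[1] = pointList[0] + pointList[1]
--     Table[2] = max(pointList[0] + pointList[2], pointList[1] + pointList[2])
--
--     for i in range(3, stairs):
--         Table[i] = max(Table[i-2] + pointList[i],
--                        Table[i-3] + pointList[i-1] + pointList[i])
--
--     return Table[stairs-1]
-- ===== SOURCE B (Python) =====
-- def getMaxPointsToTop(pointList):
--     # Dual DP: return the total of all points minus the minimum total of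
--     # points left behind on skipped stairs.
--     n = len(pointList)
--     total = sum(pointList)
--     if n <= 2:
--         return total
--     u3, u2, u1 = 0, 0, min(pointList[0], pointList[1])
--     for i in range(3, n):
--         u3, u2, u1 = u2, u1, min(u2 + pointList[i - 1], u3 + pointList[i - 2])
--     return total - u1
-- ===== Notes on version B (the rewrite author's own statement) =====
-- stated objective: alternative
-- what changed: Replaced A's forward-filled max-DP table over climbed stairs by the dual computation: sum the whole list once, run a min-DP over the points left behind on skipped stairs (u[i]=min(u[i-2]+a[i-1], u[i-3]+a[i-2])), and return total minus that minimum; equivalence is proved via the duality T(i)=prefixSum(i)-U(i).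
import Mathlib
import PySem

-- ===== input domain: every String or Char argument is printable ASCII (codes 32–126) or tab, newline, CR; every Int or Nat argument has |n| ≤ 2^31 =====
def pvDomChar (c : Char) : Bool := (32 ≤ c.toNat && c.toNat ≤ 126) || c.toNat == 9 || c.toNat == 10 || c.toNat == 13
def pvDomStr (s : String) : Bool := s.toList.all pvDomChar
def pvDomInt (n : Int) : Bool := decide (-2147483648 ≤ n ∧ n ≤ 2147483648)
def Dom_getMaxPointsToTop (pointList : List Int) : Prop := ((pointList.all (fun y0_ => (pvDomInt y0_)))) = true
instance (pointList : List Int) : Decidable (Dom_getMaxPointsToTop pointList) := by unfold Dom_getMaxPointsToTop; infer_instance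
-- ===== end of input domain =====

-- B replaces A's forward-filled max-DP table by the dual computation: the total of all
-- points minus a min-DP over the points left on skipped stairs (objective: alternative).

-- ===== PORT A =====
-- loop body of A's 'for i in range(3, stairs)', named for the proofs; indexing is
-- always in range in A, so the default 0 of pyGetD is never used
def pvBodyA (p : List Int) (T : List Int) (i : Int) : List Int :=
  PySem.List.pySetD T i
    (max (PySem.List.pyGetD T (i - 2) 0 + PySem.List.pyGetD p i 0)
         (PySem.List.pyGetD T (i - 3) 0 + PySem.List.pyGetD p (i - 1) 0
            + PySem.List.pyGetD p i 0))

def getMaxPointsToTop (pointList : List Int) : Int :=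
  let stairs : Int := pointList.length
  let Table : List Int := (PySem.List.pyRange 0 stairs 1).map (fun _ => (0 : Int))
  if stairs = 0 then 0
  else if stairs = 1 then PySem.List.pyGetD pointList 0 0
  else if stairs = 2 then PySem.List.pyGetD pointList 0 0 + PySem.List.pyGetD pointList 1 0
  else if stairs = 3 then
    max (PySem.List.pyGetD pointList 0 0 + PySem.List.pyGetD pointList 2 0)
        (PySem.List.pyGetD pointList 1 0 + PySem.List.pyGetD pointList 2 0)
  else
    let Table := PySem.List.pySetD Table 0 (PySem.List.pyGetD pointList 0 0)
    let Table := PySem.List.pySetD Table 1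
      (PySem.List.pyGetD pointList 0 0 + PySem.List.pyGetD pointList 1 0)
    let Table := PySem.List.pySetD Table 2
      (max (PySem.List.pyGetD pointList 0 0 + PySem.List.pyGetD pointList 2 0)
           (PySem.List.pyGetD pointList 1 0 + PySem.List.pyGetD pointList 2 0))
    let Table := (PySem.List.pyRange 3 stairs 1).foldl (pvBodyA pointList) Table
    PySem.List.pyGetD Table (stairs - 1) 0

-- ===== PORT B =====
-- the simultaneous assignment 'u3, u2, u1 = u2, u1, min(u2 + pointList[i-1], u3 + pointList[i-2])'
def pvStepB (p : List Int) (st : Int × Int × Int) (i : Int) : Int × Int × Int :=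
  (st.2.1, st.2.2,
   min (st.2.1 + PySem.List.pyGetD p (i - 1) 0) (st.1 + PySem.List.pyGetD p (i - 2) 0))

def getMaxPointsToTop_alt (pointList : List Int) : Int :=
  let n : Int := pointList.length
  let total : Int := pointList.sum
  if n ≤ 2 then total
  else
    total -
      ((PySem.List.pyRange 3 n 1).foldl (pvStepB pointList)
        (0, 0, min (PySem.List.pyGetD pointList 0 0) (PySem.List.pyGetD pointList 1 0))).2.2

-- ===== PRECONDITION & SPEC =====
def Spec_getMaxPointsToTop (pointList : List Int) (out : Int) : Prop := out = getMaxPointsToTop_alt pointList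
instance (pointList : List Int) (out : Int) : Decidable (Spec_getMaxPointsToTop pointList out) := by unfold Spec_getMaxPointsToTop; infer_instance

-- ===== CLAIM (what is proved, stated in full; the proofs are below) =====
def Claim_equal_getMaxPointsToTop : Prop := ∀ (pointList : List Int), Dom_getMaxPointsToTop pointList → Spec_getMaxPointsToTop pointList (getMaxPointsToTop pointList)

-- ===== LEMMAS AND PROOFS =====

-- reference recurrence: T(i) of A's docstring, with A's base cases
def pvT (p : List Int) : Nat → Int
  | 0 => p.getD 0 0
  | 1 => p.getD 0 0 + p.getD 1 0
  | 2 => max (p.getD 0 0 + p.getD 2 0) (p.getD 1 0 + p.getD 2 0)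
  | (i + 3) => max (pvT p (i + 1) + p.getD (i + 3) 0)
                   (pvT p i + p.getD (i + 2) 0 + p.getD (i + 3) 0)

-- dual recurrence: U(i) = minimum total left on skipped stairs for a play ending at i
def pvU (p : List Int) : Nat → Int
  | 0 => 0
  | 1 => 0
  | 2 => min (p.getD 0 0) (p.getD 1 0)
  | (i + 3) => min (pvU p (i + 1) + p.getD (i + 2) 0)
                   (pvU p i + p.getD (i + 1) 0)

-- duality: A's T(i) is the prefix sum up to i minus the minimal skipped total U(i)
lemma pvT_eq_sum_sub (p : List Int) : ∀ i : Nat, pvT p i = (p.take (i + 1)).sum - pvU p i := by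
  have hsum : ∀ j : Nat, (p.take (j + 1)).sum = (p.take j).sum + p.getD j 0 := by
    intro j
    rcases Nat.lt_or_ge j p.length with h | h
    · rw [List.take_add_one, List.sum_append, List.getElem?_eq_getElem h]
      simp [List.getD, List.getElem?_eq_getElem h]
    · rw [List.take_of_length_le h, List.take_of_length_le (le_trans h (Nat.le_succ j)),
          List.getD_eq_default _ _ h]
      ring
  intro i
  induction i using Nat.strong_induction_on with
  | _ i ih =>
    match i with
    | 0 => simp [pvT, pvU, hsum 0, List.take_zero]
    | 1 => simp [pvT, pvU, hsum 1, hsum 0, List.take_zero]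
    | 2 =>
      simp only [pvT, pvU, hsum 2, hsum 1, hsum 0, List.take_zero, List.sum_nil]
      rcases le_total (p.getD 0 0) (p.getD 1 0) with h | h
      · rw [min_eq_left h, max_eq_right (by omega)]; omega
      · rw [min_eq_right h, max_eq_left (by omega)]; omega
    | (i + 3) =>
      have h1 := ih (i + 1) (by omega)
      have h0 := ih i (by omega)
      have e1 : (p.take (i + 3 + 1)).sum
          = (p.take (i + 1 + 1)).sum + p.getD (i + 2) 0 + p.getD (i + 3) 0 := by
        rw [hsum (i + 3), hsum (i + 2)]
      have e0 : (p.take (i + 3 + 1)).sum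
          = (p.take (i + 1)).sum + p.getD (i + 1) 0 + p.getD (i + 2) 0 + p.getD (i + 3) 0 := by
        rw [hsum (i + 3), hsum (i + 2), hsum (i + 1)]
      show max (pvT p (i + 1) + p.getD (i + 3) 0)
              (pvT p i + p.getD (i + 2) 0 + p.getD (i + 3) 0)
          = (p.take (i + 3 + 1)).sum - min (pvU p (i + 1) + p.getD (i + 2) 0)
              (pvU p i + p.getD (i + 1) 0)
      rw [h1, h0]
      rcases le_total (pvU p (i + 1) + p.getD (i + 2) 0) (pvU p i + p.getD (i + 1) 0) with h | h
      · rw [min_eq_left h, max_eq_left (by omega)]; omega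
      · rw [min_eq_right h, max_eq_right (by omega)]; omega

-- B's rolling fold computes (U d, U (d+1), U (d+2))
lemma pvB_fold (p : List Int) : ∀ d : Nat,
    (PySem.List.pyRange 3 ((3 + d : Nat) : Int) 1).foldl (pvStepB p)
        (0, 0, min (PySem.List.pyGetD p 0 0) (PySem.List.pyGetD p 1 0))
      = (pvU p d, pvU p (d + 1), pvU p (d + 2)) := by
  intro d
  induction d with
  | zero =>
    have : PySem.List.pyRange 3 ((3 : Nat) : Int) 1 = [] := by
      apply PySem.List.pyRange_one_eq_nil; norm_num
    rw [this, List.foldl_nil]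
    have h0 : PySem.List.pyGetD p 0 0 = p.getD 0 0 := by
      simpa using PySem.List.pyGetD_natCast p 0 0
    have h1 : PySem.List.pyGetD p 1 0 = p.getD 1 0 := by
      simpa using PySem.List.pyGetD_natCast p 1 0
    simp [pvU, h0, h1]
  | succ d ih =>
    have hsplit : PySem.List.pyRange 3 ((3 + (d + 1) : Nat) : Int) 1
        = PySem.List.pyRange 3 ((3 + d : Nat) : Int) 1 ++ [((3 + d : Nat) : Int)] := by
      rw [show ((3 + (d + 1) : Nat) : Int) = ((3 + d : Nat) : Int) + 1 by push_cast; ring]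
      exact PySem.List.pyRange_one_succ_right (by exact_mod_cast Nat.le_add_right 3 d)
    rw [hsplit, List.foldl_append, ih, List.foldl_cons, List.foldl_nil]
    unfold pvStepB
    have e1 : ((3 + d : Nat) : Int) - 1 = ((d + 2 : Nat) : Int) := by push_cast; ring
    have e2 : ((3 + d : Nat) : Int) - 2 = ((d + 1 : Nat) : Int) := by push_cast; ring
    rw [e1, e2, PySem.List.pyGetD_natCast, PySem.List.pyGetD_natCast]
    show (pvU p (d + 1), pvU p (d + 2),
          min (pvU p (d + 1) + p.getD (d + 2) 0) (pvU p d + p.getD (d + 1) 0))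
        = (pvU p (d + 1), pvU p (d + 1 + 1), pvU p (d + 1 + 2))
    rw [show d + 1 + 2 = d + 3 by omega]
    rfl

-- A's table loop fills Table[j] = T(j)
lemma pvA_loop (p T0 : List Int) (hlen : T0.length = p.length)
    (h012 : ∀ j : Nat, j < 3 → T0.getD j 0 = pvT p j) :
    ∀ d : Nat, 3 + d ≤ p.length →
      ((PySem.List.pyRange 3 ((3 + d : Nat) : Int) 1).foldl (pvBodyA p) T0).length = p.length ∧
      ∀ j : Nat, j < 3 + d →
        ((PySem.List.pyRange 3 ((3 + d : Nat) : Int) 1).foldl (pvBodyA p) T0).getD j 0 = pvT p j := by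
  intro d
  induction d with
  | zero =>
    intro _
    have : PySem.List.pyRange 3 ((3 : Nat) : Int) 1 = [] := by
      apply PySem.List.pyRange_one_eq_nil; norm_num
    simpa [this] using ⟨hlen, h012⟩
  | succ d ih =>
    intro hle
    have hle' : 3 + d ≤ p.length := by omega
    obtain ⟨ihlen, ihval⟩ := ih hle'
    have hsplit : PySem.List.pyRange 3 ((3 + (d + 1) : Nat) : Int) 1
        = PySem.List.pyRange 3 ((3 + d : Nat) : Int) 1 ++ [((3 + d : Nat) : Int)] := by
      rw [show ((3 + (d + 1) : Nat) : Int) = ((3 + d : Nat) : Int) + 1 by push_cast; ring]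
      exact PySem.List.pyRange_one_succ_right (by exact_mod_cast Nat.le_add_right 3 d)
    set U := (PySem.List.pyRange 3 ((3 + d : Nat) : Int) 1).foldl (pvBodyA p) T0 with hU
    have hval : pvBodyA p U ((3 + d : Nat) : Int)
        = PySem.List.pySetD U ((3 + d : Nat) : Int) (pvT p (3 + d)) := by
      unfold pvBodyA
      congr 1
      have e2 : ((3 + d : Nat) : Int) - 2 = ((d + 1 : Nat) : Int) := by push_cast; ring
      have e3 : ((3 + d : Nat) : Int) - 3 = ((d : Nat) : Int) := by push_cast; ring
      have e1 : ((3 + d : Nat) : Int) - 1 = ((d + 2 : Nat) : Int) := by push_cast; ring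
      rw [e1, e2, e3]
      simp only [PySem.List.pyGetD_natCast]
      rw [ihval (d + 1) (by omega), ihval d (by omega),
          show (3 + d : Nat) = d + 3 by omega, pvT]
    constructor
    · rw [hsplit, List.foldl_append, List.foldl_cons, List.foldl_nil, hval,
          PySem.List.length_pySetD]
      exact ihlen
    · intro j hj
      rw [hsplit, List.foldl_append, List.foldl_cons, List.foldl_nil, hval]
      have hset := PySem.List.pyGetD_pySetD_natCast U (3 + d) j (pvT p (3 + d)) 0
        (by rw [ihlen]; omega)
      rw [← PySem.List.pyGetD_natCast, hset]
      by_cases hjd : j = 3 + d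
      · simp [hjd]
      · rw [if_neg hjd, PySem.List.pyGetD_natCast]
        exact ihval j (by omega)

theorem getMaxPointsToTop_spec : Claim_equal_getMaxPointsToTop := by
  unfold Claim_equal_getMaxPointsToTop Spec_getMaxPointsToTop
  intro p _
  match p with
  | [] => decide
  | [a] =>
    simp [getMaxPointsToTop, getMaxPointsToTop_alt, PySem.List.pyGetD,
      PySem.List.pyGet?, PySem.List.pyIdx?]
  | [a, b] =>
    simp [getMaxPointsToTop, getMaxPointsToTop_alt, PySem.List.pyGetD,
      PySem.List.pyGet?, PySem.List.pyIdx?]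
  | [a, b, c] =>
    have hr : PySem.List.pyRange 3 3 1 = [] := by
      apply PySem.List.pyRange_one_eq_nil; norm_num
    simp [getMaxPointsToTop, getMaxPointsToTop_alt, hr, PySem.List.pyGetD,
      PySem.List.pyGet?, PySem.List.pyIdx?]
    omega
  | a :: b :: c :: x :: rest =>
    set q := a :: b :: c :: x :: rest with hq
    have hn : 4 ≤ q.length := by simp [hq]
    -- B side: total minus the fold's minimal skipped value
    have hB : getMaxPointsToTop_alt q = q.sum - pvU q (q.length - 1) := by
      unfold getMaxPointsToTop_alt
      rw [if_neg (by omega)]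
      rw [show ((q.length : Nat) : Int) = ((3 + (q.length - 3) : Nat) : Int) by congr 1; omega]
      rw [pvB_fold q (q.length - 3)]
      have : q.length - 3 + 2 = q.length - 1 := by omega
      rw [this]
    rw [hB]
    -- bridge: pvT (n-1) = q.sum - pvU (n-1)
    have hbridge : pvT q (q.length - 1) = q.sum - pvU q (q.length - 1) := by
      have := pvT_eq_sum_sub q (q.length - 1)
      rwa [show q.length - 1 + 1 = q.length by omega, List.take_length] at this
    rw [← hbridge]
    -- A side
    unfold getMaxPointsToTop
    rw [if_neg (by intro h; rw [hq] at h; simp only [List.length_cons] at h; omega),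
        if_neg (by intro h; rw [hq] at h; simp only [List.length_cons] at h; omega),
        if_neg (by intro h; rw [hq] at h; simp only [List.length_cons] at h; omega),
        if_neg (by intro h; rw [hq] at h; simp only [List.length_cons] at h; omega)]
    have hT0len : ((PySem.List.pyRange 0 (q.length : Int) 1).map (fun _ => (0:Int))).length
        = q.length := by
      simp [PySem.List.length_pyRange_one]
    have hT0 : ∀ j : Nat, ((PySem.List.pyRange 0 (q.length : Int) 1).map
        (fun _ => (0:Int))).getD j 0 = 0 := by
      intro j
      rcases Nat.lt_or_ge j q.length with h | h
      · rw [List.getD_eq_getElem _ _ (by rw [hT0len]; exact h)]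
        simp
      · rw [List.getD_eq_default _ _ (by rw [hT0len]; exact h)]
    set T0 := (PySem.List.pyRange 0 (q.length : Int) 1).map (fun _ => (0:Int)) with hT0def
    set T3 := PySem.List.pySetD (PySem.List.pySetD (PySem.List.pySetD T0 0
        (PySem.List.pyGetD q 0 0)) 1
        (PySem.List.pyGetD q 0 0 + PySem.List.pyGetD q 1 0)) 2
        (max (PySem.List.pyGetD q 0 0 + PySem.List.pyGetD q 2 0)
             (PySem.List.pyGetD q 1 0 + PySem.List.pyGetD q 2 0)) with hT3
    have hT3len : T3.length = q.length := by
      rw [hT3]; simp [PySem.List.length_pySetD, hT0len]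
    have hT3val : ∀ j : Nat, j < 3 → T3.getD j 0 = pvT q j := by
      intro j hj
      rw [hT3]
      have l0 : T0.length = q.length := hT0len
      have c0 : ((0:Nat):Int) = (0:Int) := by norm_num
      have c1 : ((1:Nat):Int) = (1:Int) := by norm_num
      have c2 : ((2:Nat):Int) = (2:Int) := by norm_num
      rw [← PySem.List.pyGetD_natCast, ← c2, ← c1, ← c0,
          PySem.List.pyGetD_pySetD_natCast _ 2 j _ _ (by simp [PySem.List.length_pySetD, l0]; omega),
          ]
      by_cases h2 : j = 2
      · rw [if_pos h2, h2]
        rw [PySem.List.pyGetD_natCast q 0, PySem.List.pyGetD_natCast q 1,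
            PySem.List.pyGetD_natCast q 2] at *
        simp [pvT, pysem]
      · rw [if_neg h2,
            PySem.List.pyGetD_pySetD_natCast _ 1 j _ _ (by simp [PySem.List.length_pySetD, l0]; omega)]
        by_cases h1 : j = 1
        · rw [if_pos h1, h1]; simp [pvT, pysem]
        · rw [if_neg h1,
              PySem.List.pyGetD_pySetD_natCast _ 0 j _ _ (by rw [l0]; omega)]
          have h0 : j = 0 := by omega
          rw [if_pos h0, h0]; simp [pvT, pysem]
    have hmain := pvA_loop q T3 hT3len hT3val (q.length - 3) (by omega)
    have hcast : ((3 + (q.length - 3) : Nat) : Int) = (q.length : Int) := by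
      push_cast [show 3 + (q.length - 3) = q.length by omega]; rfl
    rw [hcast] at hmain
    obtain ⟨_, hval⟩ := hmain
    have := hval (q.length - 1) (by omega)
    rw [show ((q.length : Int) - 1) = ((q.length - 1 : Nat) : Int) by push_cast [show (1:Nat) ≤ q.length by omega]; ring]
    rw [PySem.List.pyGetD_natCast]
    exact this
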